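-- pv_equiv track=rewrite | github.com/Hershill/comp-bio-monorepo | CISC471HW5/convolution_cyclopeptide_sequencing.py | spectral_convolution
-- ===== SOURCE A (Python) =====
-- from copy import deepcopy
--
-- def spectral_convolution(experimental_spectrum):
--     """Perform convolution of the experimental spectrum
--
--     :param experimental_spectrum: the given experimental spectrum
--     :return: list of elements in the convolution of the experimental spectrum
--     """
--
--     convolution = dict()
--     experimental_spectrum_temp = deepcopy(experimental_spectrum)
--     experimental_spectrum_temp.sort(reverse=True)
--     reversed_spectrum = deepcopy(experimental_spectrum)
--     reversed_spectrum.sort(reverse=True)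
--
--     for amino_mass in reversed_spectrum:
--         experimental_spectrum_temp.remove(amino_mass)
--         for amino_sub in experimental_spectrum_temp:
--             diff = amino_mass - amino_sub
--             if diff != 0:
--                 if diff in convolution:
--                     convolution[diff] += 1
--                 else:
--                     convolution[diff] = 1
--
--     # sort the convolution
--     sorted_mass = list()
--     sorted_convolution = sorted(convolution, key=convolution.get, reverse=True)
--     for mass in sorted_convolution:
--         for nums in range(convolution[mass]):
--             sorted_mass.append(mass)
--
--     return sorted_mass, convolution
-- ===== SOURCE B (Python) =====
-- def spectral_convolution(experimental_spectrum):
--     """Perform convolution of the experimental spectrum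
--
--     Frequency-table reformulation: count every mass once, iterate the
--     distinct masses in descending order and weight each difference by the
--     product of the two multiplicities, instead of scanning all pairs of
--     (possibly duplicated) elements with deepcopy/remove.
--     """
--     counts = {}
--     for mass in experimental_spectrum:
--         counts[mass] = counts.get(mass, 0) + 1
--
--     vals = sorted(set(experimental_spectrum), reverse=True)
--
--     convolution = {}
--     rest = vals
--     while rest:
--         a = rest[0]
--         rest = rest[1:]
--         ca = counts[a]
--         for b in rest:
--             diff = a - b
--             convolution[diff] = convolution.get(diff, 0) + ca * counts[b]
--
--     sorted_mass = []
--     for mass in sorted(convolution, key=convolution.get, reverse=True):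
--         sorted_mass.extend([mass] * convolution[mass])
--
--     return sorted_mass, convolution
-- ===== Notes on version B (the rewrite author's own statement) =====
-- stated objective: alternative
-- what changed: Replaces deepcopy+remove all-pairs scanning over the duplicated spectrum by a frequency table plus a single pass over the distinct masses in descending order, adding counts[a]*counts[b] per distinct pair; the dict key order and the sorted output are reproduced exactly.
import Mathlib
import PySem

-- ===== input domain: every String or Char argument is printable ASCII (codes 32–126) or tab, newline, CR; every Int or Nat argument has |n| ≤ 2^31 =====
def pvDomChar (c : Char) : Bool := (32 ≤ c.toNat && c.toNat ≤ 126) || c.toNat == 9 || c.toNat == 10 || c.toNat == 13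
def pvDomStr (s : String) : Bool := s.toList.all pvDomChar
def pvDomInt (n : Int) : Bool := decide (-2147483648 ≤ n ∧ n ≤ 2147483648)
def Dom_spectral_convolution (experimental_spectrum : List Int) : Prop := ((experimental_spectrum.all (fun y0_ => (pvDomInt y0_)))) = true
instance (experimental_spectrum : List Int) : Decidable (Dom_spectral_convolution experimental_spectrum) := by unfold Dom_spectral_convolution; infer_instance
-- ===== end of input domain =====

-- B replaces A's deepcopy+remove all-pairs scan by a frequency table and one pass
-- over the distinct masses in descending order (alternative decomposition, same result).

-- ===== PORT A =====
-- inner loop body: 'diff = amino_mass - amino_sub; if diff != 0: convolution[diff] += 1 / = 1'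
def pvAinner (amino_mass : Int) (conv : PySem.Dict Int Int) (amino_sub : Int) : PySem.Dict Int Int :=
  let diff := amino_mass - amino_sub
  if diff ≠ 0 then
    if conv.contains diff then conv.insert diff (conv.getD diff 0 + 1)
    else conv.insert diff 1
  else conv

-- outer loop body: 'experimental_spectrum_temp.remove(amino_mass); for amino_sub in …'
-- (.remove always succeeds here — temp holds the still-unprocessed elements — so getD only makes it total)
def pvAstep (st : List Int × PySem.Dict Int Int) (amino_mass : Int) : List Int × PySem.Dict Int Int :=
  let temp := (PySem.List.remove? st.1 amino_mass).getD st.1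
  (temp, temp.foldl (pvAinner amino_mass) st.2)

def spectral_convolution (experimental_spectrum : List Int) : List Int × (List (Int × Int)) :=
  let experimental_spectrum_temp := PySem.List.sorted experimental_spectrum (fun x => x) true
  let reversed_spectrum := PySem.List.sorted experimental_spectrum (fun x => x) true
  let st := reversed_spectrum.foldl pvAstep (experimental_spectrum_temp, PySem.Dict.empty)
  let convolution := st.2
  let sorted_convolution := PySem.List.sorted convolution.keys (fun m => convolution.getD m 0) true
  let sorted_mass := sorted_convolution.foldl
    (fun acc mass => (PySem.List.pyRange 0 (convolution.getD mass 0)).foldl (fun acc _ => acc ++ [mass]) acc) []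
  (sorted_mass, convolution.items)

-- ===== PORT B =====
-- the 'while rest: a = rest[0]; rest = rest[1:]; for b in rest: …' loop of Source B
def pvPairs (counts : PySem.Dict Int Int) : List Int → PySem.Dict Int Int → PySem.Dict Int Int
  | [], conv => conv
  | a :: rest, conv =>
      let ca := counts.getD a 0    -- counts[a]; the key is always present, getD only makes it total
      pvPairs counts rest
        (rest.foldl (fun conv b => conv.insert (a - b) (conv.getD (a - b) 0 + ca * counts.getD b 0)) conv)

def spectral_convolution_alt (experimental_spectrum : List Int) : List Int × (List (Int × Int)) :=
  let counts := experimental_spectrum.foldl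
    (fun d mass => d.insert mass (d.getD mass 0 + 1)) PySem.Dict.empty
  let vals := PySem.List.sorted (PySem.Set.ofList experimental_spectrum) (fun x => x) true
  let convolution := pvPairs counts vals PySem.Dict.empty
  let sorted_convolution := PySem.List.sorted convolution.keys (fun m => convolution.getD m 0) true
  let sorted_mass := sorted_convolution.foldl
    (fun acc mass => acc ++ PySem.List.pyRepeat [mass] (convolution.getD mass 0)) []
  (sorted_mass, convolution.items)

-- ===== PRECONDITION & SPEC =====
def Spec_spectral_convolution (experimental_spectrum : List Int) (out : List Int × (List (Int × Int))) : Prop := out = spectral_convolution_alt experimental_spectrum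
instance (experimental_spectrum : List Int) (out : List Int × (List (Int × Int))) : Decidable (Spec_spectral_convolution experimental_spectrum out) := by unfold Spec_spectral_convolution; infer_instance

-- ===== CLAIM (what is proved, stated in full; the proofs are below) =====
def Claim_equal_spectral_convolution : Prop := ∀ (experimental_spectrum : List Int), Dom_spectral_convolution experimental_spectrum → Spec_spectral_convolution experimental_spectrum (spectral_convolution experimental_spectrum)

-- ===== LEMMAS AND PROOFS =====

-- A's loop once the 'remove' bookkeeping is discharged: process each element against the tail
def pvGoA : List Int → PySem.Dict Int Int → PySem.Dict Int Int
  | [], d => d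
  | a :: t, d => pvGoA t (t.foldl (pvAinner a) d)

-- increment schedules: a list of (key, amount) insert-increments applied in order
def pvApply (d : PySem.Dict Int Int) (ops : List (Int × Int)) : PySem.Dict Int Int :=
  ops.foldl (fun d p => d.insert p.1 (d.getD p.1 0 + p.2)) d

def pvOps1 : List Int → List (Int × Int)
  | [] => []
  | a :: t => (t.filter (fun b => decide (a - b ≠ 0))).map (fun b => (a - b, (1 : Int))) ++ pvOps1 t

def pvOps2 (counts : PySem.Dict Int Int) : List Int → List (Int × Int)
  | [] => []
  | a :: t => t.map (fun b => (a - b, counts.getD a 0 * counts.getD b 0)) ++ pvOps2 counts t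

def pvWeight (k : Int) (ops : List (Int × Int)) : Int :=
  ((ops.filter (fun p => p.1 == k)).map (·.2)).sum

lemma pvAinner_eq (a : Int) (c : PySem.Dict Int Int) (b : Int) :
    pvAinner a c b = if a - b ≠ 0 then c.insert (a - b) (c.getD (a - b) 0 + 1) else c := by
  unfold pvAinner
  by_cases h : c.contains (a - b) = true
  · simp [h]
  · simp only [Bool.not_eq_true] at h
    simp [h, PySem.Dict.getD_of_not_contains c 0 h]

lemma pvApply_keys (d : PySem.Dict Int Int) (ops : List (Int × Int)) :
    (pvApply d ops).keys = PySem.Set.update d.keys (ops.map (·.1)) := by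
  exact PySem.Dict.keys_foldl_insert_key ops (·.1) (fun d p => d.getD p.1 0 + p.2) d

lemma pvApply_nodup (d : PySem.Dict Int Int) (ops : List (Int × Int)) (h : d.keys.Nodup) :
    (pvApply d ops).keys.Nodup :=
  PySem.Dict.nodup_keys_foldl_insert_key ops (·.1) (fun d p => d.getD p.1 0 + p.2) d h

lemma pvApply_getD (ops : List (Int × Int)) (d : PySem.Dict Int Int) (k : Int) :
    (pvApply d ops).getD k 0 = d.getD k 0 + pvWeight k ops := by
  induction ops generalizing d with
  | nil => simp [pvApply, pvWeight]
  | cons p t ih =>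
    simp only [pvApply, List.foldl_cons] at *
    rw [ih]
    by_cases h : p.1 = k
    · subst h
      simp [pvWeight, PySem.Dict.getD_insert_self]
      ring
    · rw [PySem.Dict.getD_insert_of_ne (hne := fun hh => h hh.symm)]
      simp [pvWeight, beq_iff_eq, h]

lemma pvDict_eq (d1 d2 : PySem.Dict Int Int) (hk : d1.keys = d2.keys)
    (h1 : d1.keys.Nodup) (h2 : d2.keys.Nodup)
    (hv : ∀ k, d1.getD k 0 = d2.getD k 0) : d1 = d2 := by
  apply PySem.Dict.ext
  rw [PySem.Dict.items_eq_map_keys d1 h1 0, PySem.Dict.items_eq_map_keys d2 h2 0, hk]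
  exact List.map_congr_left (fun k _ => by rw [hv k])

lemma pvWeight_append (k : Int) (o1 o2 : List (Int × Int)) :
    pvWeight k (o1 ++ o2) = pvWeight k o1 + pvWeight k o2 := by
  simp [pvWeight, List.filter_append]

lemma pvWeight_flatten_replicate (k : Int) (m : Nat) (F : List (Int × Int)) :
    pvWeight k (List.replicate m F).flatten = m * pvWeight k F := by
  induction m with
  | zero => simp [pvWeight]
  | succ i ih =>
      rw [List.replicate_succ, List.flatten_cons, pvWeight_append, ih]
      push_cast; ring

lemma pvWeight_map (k a : Int) (w : Int → Int) (r : List Int) :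
    pvWeight k (r.map (fun b => (a - b, w b))) =
      ((r.filter (fun b => a - b == k)).map w).sum := by
  simp [pvWeight, List.filter_map, List.map_map, Function.comp_def]

lemma pvA_loop (s : List Int) (d : PySem.Dict Int Int) :
    s.foldl pvAstep (s, d) = ([], pvGoA s d) := by
  induction s generalizing d with
  | nil => simp [pvGoA]
  | cons a t ih =>
      have hrem : PySem.List.remove? (a :: t) a = some t := by
        simp [PySem.List.remove?, List.idxOf?_cons]
      rw [List.foldl_cons]
      have hstep : pvAstep (a :: t, d) a = (t, t.foldl (pvAinner a) d) := by
        simp [pvAstep, hrem]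
      rw [hstep, ih]
      rfl

lemma pvGoA_eq_apply (s : List Int) (d : PySem.Dict Int Int) :
    pvGoA s d = pvApply d (pvOps1 s) := by
  induction s generalizing d with
  | nil => rfl
  | cons a t ih =>
      show pvGoA t (t.foldl (pvAinner a) d) = _
      rw [ih]
      have : pvOps1 (a :: t) = (t.filter (fun b => decide (a - b ≠ 0))).map (fun b => (a - b, (1 : Int))) ++ pvOps1 t := rfl
      rw [this]
      simp only [pvApply, List.foldl_append]
      congr 1
      have h1 : t.foldl (pvAinner a) d
          = (t.filter (fun b => decide (a - b ≠ 0))).foldl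
              (fun c b => c.insert (a - b) (c.getD (a - b) 0 + 1)) d := by
        rw [PySem.List.foldl_congr_mem t (pvAinner a)
              (fun c b => if a - b ≠ 0 then c.insert (a - b) (c.getD (a - b) 0 + 1) else c) d
              (fun c b _ => pvAinner_eq a c b)]
        exact PySem.List.foldl_ite_eq_foldl_filter _ _ _ _
      rw [h1, List.foldl_map]

lemma pvPairs_eq_apply (counts : PySem.Dict Int Int) (l : List Int) (d : PySem.Dict Int Int) :
    pvPairs counts l d = pvApply d (pvOps2 counts l) := by
  induction l generalizing d with
  | nil => rfl
  | cons a t ih =>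
      show pvPairs counts t _ = _
      rw [ih]
      have : pvOps2 counts (a :: t) = t.map (fun b => (a - b, counts.getD a 0 * counts.getD b 0)) ++ pvOps2 counts t := rfl
      rw [this]
      simp only [pvApply, List.foldl_append, List.foldl_map]

lemma pvCount_flatMap (n : Int → Nat) (l : List Int) (hl : l.Nodup) (y : Int) :
    (l.flatMap (fun v => List.replicate (n v) v)).count y = if y ∈ l then n y else 0 := by
  induction l with
  | nil => simp
  | cons a t ih =>
      simp only [List.flatMap_cons, List.count_append, List.count_replicate,
        List.nodup_cons] at *
      rcases hl with ⟨ha, ht⟩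
      rw [ih ht]
      by_cases h : y = a
      · subst h; simp [ha]
      · simp [h, Ne.symm h]

lemma pvVals_pairwise (xs : List Int) :
    List.Pairwise (fun a b => b < a) (PySem.List.sorted (PySem.Set.ofList xs) (fun x => x) true) := by
  have hnd : (PySem.List.sorted (PySem.Set.ofList xs) (fun x => x) true).Nodup :=
    (PySem.List.sorted_perm _ _ _).nodup_iff.mpr (PySem.Set.nodup_ofList xs)
  have hpw := PySem.List.sorted_pairwise_rev (PySem.Set.ofList xs) (fun x => x)
  have hne := List.Nodup.pairwise_of_forall_ne hnd (r := fun a b => a ≠ b) (fun a _ b _ h => h)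
  exact (hpw.and hne).imp (fun ⟨hle, hneq⟩ => lt_of_le_of_ne hle (Ne.symm hneq))

lemma pvMem_flatMap_replicate (n : Int → Nat) (l : List Int) (y : Int) :
    y ∈ l.flatMap (fun v => List.replicate (n v) v) → y ∈ l := by
  intro h
  rcases List.mem_flatMap.mp h with ⟨v, hv, hy⟩
  rw [List.eq_of_mem_replicate hy]; exact hv

lemma pvFlatMap_pairwise (n : Int → Nat) (l : List Int)
    (hl : List.Pairwise (fun a b => b < a) l) :
    List.Pairwise (fun a b : Int => b ≤ a) (l.flatMap (fun v => List.replicate (n v) v)) := by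
  induction l with
  | nil => simp
  | cons a t ih =>
      rcases List.pairwise_cons.mp hl with ⟨hhead, htail⟩
      rw [List.flatMap_cons, List.pairwise_append]
      refine ⟨List.pairwise_replicate.mpr (Or.inr le_rfl), ih htail, ?_⟩
      intro x hx y hy
      rw [List.eq_of_mem_replicate hx]
      exact le_of_lt (hhead y (pvMem_flatMap_replicate n t y hy))

lemma pvSorted_eq_flatMap (xs : List Int) :
    PySem.List.sorted xs (fun x => x) true =
      (PySem.List.sorted (PySem.Set.ofList xs) (fun x => x) true).flatMap
        (fun v => List.replicate (xs.count v) v) := by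
  have hvals := pvVals_pairwise xs
  have hndvals : (PySem.List.sorted (PySem.Set.ofList xs) (fun x => x) true).Nodup :=
    (PySem.List.sorted_perm _ _ _).nodup_iff.mpr (PySem.Set.nodup_ofList xs)
  have hmem : ∀ y : Int, y ∈ PySem.List.sorted (PySem.Set.ofList xs) (fun x => x) true ↔ y ∈ xs := by
    intro y
    rw [(PySem.List.sorted_perm _ _ _).mem_iff, PySem.Set.mem_ofList]
  have hperm : (PySem.List.sorted xs (fun x => x) true).Perm
      ((PySem.List.sorted (PySem.Set.ofList xs) (fun x => x) true).flatMap
        (fun v => List.replicate (xs.count v) v)) := by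
    refine (PySem.List.sorted_perm xs (fun x => x) true).trans ?_
    rw [List.perm_iff_count]
    intro y
    rw [pvCount_flatMap _ _ hndvals y]
    by_cases h : y ∈ xs
    · simp [(hmem y).mpr h]
    · simp [(hmem y), h, List.count_eq_zero_of_not_mem h]
  exact hperm.eq_of_pairwise (fun a b _ _ h1 h2 => le_antisymm h2 h1) (PySem.List.sorted_pairwise_rev xs (fun x => x)) (pvFlatMap_pairwise _ _ hvals)

lemma pvOps1_replicate_append (a : Int) (m : Nat) (r : List Int) (hr : ∀ b ∈ r, b < a) :
    pvOps1 (List.replicate m a ++ r) =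
      (List.replicate m ((r.map (fun b => (a - b, (1 : Int)))))).flatten ++ pvOps1 r := by
  induction m with
  | zero => simp
  | succ i ih =>
      rw [List.replicate_succ, List.cons_append]
      have h1 : pvOps1 (a :: (List.replicate i a ++ r)) =
          ((List.replicate i a ++ r).filter (fun b => decide (a - b ≠ 0))).map
            (fun b => (a - b, (1 : Int))) ++ pvOps1 (List.replicate i a ++ r) := rfl
      rw [h1, ih]
      have h2 : (List.replicate i a ++ r).filter (fun b => decide (a - b ≠ 0)) = r := by
        rw [List.filter_append]
        have : (List.replicate i a).filter (fun b => decide (a - b ≠ 0)) = [] := by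
          simp
        rw [this]
        rw [List.filter_eq_self.mpr (fun b hb => by simpa using (sub_ne_zero_of_ne (ne_of_gt (hr b hb))))]
        simp
      rw [h2, List.replicate_succ, List.flatten_cons, List.append_assoc]

lemma pvUpdate_of_subset (T : PySem.Set Int) (l : List Int) (h : ∀ x ∈ l, x ∈ T) :
    PySem.Set.update T l = T := by
  induction l generalizing T with
  | nil => simp [PySem.Set.update_nil]
  | cons x t ih =>
      rw [PySem.Set.update_cons, PySem.Set.add_of_mem (h x (by simp))]
      exact ih T (fun y hy => h y (by simp [hy]))

lemma pvUpdate_flatten_replicate (S : PySem.Set Int) (L : List Int) (m : Nat) (hm : 1 ≤ m) :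
    PySem.Set.update S (List.replicate m L).flatten = PySem.Set.update S L := by
  rcases Nat.exists_eq_add_of_le hm with ⟨i, hi⟩
  rw [hi, Nat.add_comm, List.replicate_succ, List.flatten_cons, PySem.Set.update_append]
  apply pvUpdate_of_subset
  intro x hx
  rcases List.mem_flatten.mp hx with ⟨l, hl, hxl⟩
  rw [List.eq_of_mem_replicate hl] at hxl
  exact (PySem.Set.mem_update S L x).mpr (Or.inr hxl)

lemma pvUpdate_replicate (S : PySem.Set Int) (x : Int) (m : Nat) (hm : 1 ≤ m) :
    PySem.Set.update S (List.replicate m x) = S.add x := by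
  rcases Nat.exists_eq_add_of_le hm with ⟨i, hi⟩
  rw [hi, Nat.add_comm, List.replicate_succ, PySem.Set.update_cons]
  apply pvUpdate_of_subset
  intro y hy
  rw [List.eq_of_mem_replicate hy]
  exact (PySem.Set.mem_add S x x).mpr (Or.inr rfl)

lemma pvUpdate_flatMap_replicate (S : PySem.Set Int) (n : Int → Nat) (f : Int → Int) (l : List Int)
    (h : ∀ v ∈ l, 1 ≤ n v) :
    PySem.Set.update S ((l.flatMap (fun v => List.replicate (n v) v)).map f) =
      PySem.Set.update S (l.map f) := by
  induction l generalizing S with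
  | nil => simp
  | cons a t ih =>
      rw [List.flatMap_cons, List.map_append, PySem.Set.update_append, List.map_replicate,
        pvUpdate_replicate S (f a) _ (h a (by simp)), List.map_cons, PySem.Set.update_cons]
      exact ih (S.add (f a)) (fun v hv => h v (by simp [hv]))

lemma pvCounts_getD (xs : List Int) (v : Int) :
    (xs.foldl (fun d mass => d.insert mass (d.getD mass 0 + 1)) (PySem.Dict.empty : PySem.Dict Int Int)).getD v 0
      = (xs.count v : Int) := by
  rw [PySem.Dict.getD_foldl_insert_add_one, PySem.Dict.getD_empty]
  simp

lemma pvKeys_eq (counts : PySem.Dict Int Int) (n : Int → Nat) :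
    ∀ (l : List Int) (S : PySem.Set Int), List.Pairwise (fun a b => b < a) l → (∀ v ∈ l, 1 ≤ n v) →
      PySem.Set.update S ((pvOps1 (l.flatMap (fun v => List.replicate (n v) v))).map (·.1)) =
      PySem.Set.update S ((pvOps2 counts l).map (·.1)) := by
  intro l
  induction l with
  | nil => intro S _ _; rfl
  | cons a t ih =>
      intro S hpw hn
      rcases List.pairwise_cons.mp hpw with ⟨hhead, htail⟩
      have hr : ∀ b ∈ t.flatMap (fun v => List.replicate (n v) v), b < a :=
        fun b hb => hhead b (pvMem_flatMap_replicate n t b hb)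
      rw [List.flatMap_cons,
        pvOps1_replicate_append a (n a) _ hr,
        List.map_append, PySem.Set.update_append]
      have hflat : ((List.replicate (n a) ((t.flatMap (fun v => List.replicate (n v) v)).map (fun b => (a - b, (1:Int))))).flatten).map (fun p : Int × Int => p.1)
          = (List.replicate (n a) (((t.flatMap (fun v => List.replicate (n v) v)).map (fun b => a - b)))).flatten := by
        rw [List.map_flatten, List.map_replicate, List.map_map]
        rfl
      rw [hflat, pvUpdate_flatten_replicate _ _ _ (hn a (by simp)),
        pvUpdate_flatMap_replicate S n (fun b => a - b) t (fun v hv => hn v (by simp [hv]))]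
      have h2 : (pvOps2 counts (a :: t)).map (fun p : Int × Int => p.1)
          = t.map (fun b => a - b) ++ (pvOps2 counts t).map (fun p : Int × Int => p.1) := by
        show (List.map _ (_ ++ _)) = _
        rw [List.map_append, List.map_map]
        rfl
      rw [h2, PySem.Set.update_append]
      exact ih _ htail (fun v hv => hn v (by simp [hv]))

lemma pvWeight_eq (counts : PySem.Dict Int Int) (n : Int → Nat)
    (hc : ∀ v, counts.getD v 0 = (n v : Int)) (k : Int) :
    ∀ (l : List Int), List.Pairwise (fun a b => b < a) l →
      pvWeight k (pvOps1 (l.flatMap (fun v => List.replicate (n v) v))) =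
      pvWeight k (pvOps2 counts l) := by
  intro l
  induction l with
  | nil => intro _; rfl
  | cons a t ih =>
      intro hpw
      rcases List.pairwise_cons.mp hpw with ⟨hhead, htail⟩
      have hnd : t.Nodup := htail.imp (fun h => ne_of_gt h)
      have hr : ∀ b ∈ t.flatMap (fun v => List.replicate (n v) v), b < a :=
        fun b hb => hhead b (pvMem_flatMap_replicate n t b hb)
      rw [List.flatMap_cons, pvOps1_replicate_append a (n a) _ hr,
        pvWeight_append, pvWeight_flatten_replicate, pvWeight_map]
      have hfe : ∀ (r : List Int), r.filter (fun b => a - b == k) = r.filter (fun b => b == a - k) := by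
        intro r
        apply List.filter_congr
        intro b _
        apply Bool.eq_iff_iff.mpr
        simp only [beq_iff_eq]
        omega
      have h2 : pvWeight k (pvOps2 counts (a :: t))
          = ((t.filter (fun b => a - b == k)).map (fun b => counts.getD a 0 * counts.getD b 0)).sum
            + pvWeight k (pvOps2 counts t) := by
        show pvWeight k (_ ++ _) = _
        rw [pvWeight_append, pvWeight_map]
      rw [h2, ih htail, hfe, hfe]
      congr 1
      -- remaining: group contribution equality
      rw [List.filter_beq, List.filter_beq]
      have hcnt : (t.flatMap (fun v => List.replicate (n v) v)).count (a - k)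
          = if (a - k) ∈ t then n (a - k) else 0 := pvCount_flatMap n t hnd (a - k)
      by_cases hm : (a - k) ∈ t
      · have : t.count (a - k) = 1 := List.count_eq_one_of_mem hnd hm
        rw [hcnt, this]
        simp [hm, hc]
      · have : t.count (a - k) = 0 := List.count_eq_zero_of_not_mem hm
        rw [hcnt, this]
        simp [hm]

lemma pvConv_eq (xs : List Int) :
    pvGoA (PySem.List.sorted xs (fun x => x) true) PySem.Dict.empty =
      pvPairs (xs.foldl (fun d mass => d.insert mass (d.getD mass 0 + 1)) (PySem.Dict.empty : PySem.Dict Int Int))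
        (PySem.List.sorted (PySem.Set.ofList xs) (fun x => x) true) PySem.Dict.empty := by
  set counts := xs.foldl (fun d mass => d.insert mass (d.getD mass 0 + 1)) (PySem.Dict.empty : PySem.Dict Int Int) with hcounts
  set vals := PySem.List.sorted (PySem.Set.ofList xs) (fun x => x) true with hvals
  set n : Int → Nat := fun v => xs.count v with hn
  have hmemvals : ∀ v ∈ vals, v ∈ xs := by
    intro v hv
    rw [hvals, (PySem.List.sorted_perm _ _ _).mem_iff, PySem.Set.mem_ofList] at hv
    exact hv
  have hpos : ∀ v ∈ vals, 1 ≤ n v := fun v hv => List.count_pos_iff.mpr (hmemvals v hv)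
  have hc : ∀ v, counts.getD v 0 = (n v : Int) := fun v => pvCounts_getD xs v
  rw [pvGoA_eq_apply, pvPairs_eq_apply, pvSorted_eq_flatMap]
  apply pvDict_eq
  · rw [pvApply_keys, pvApply_keys, PySem.Dict.keys_empty]
    exact pvKeys_eq counts n vals PySem.Set.empty (pvVals_pairwise xs) hpos
  · exact pvApply_nodup _ _ PySem.Dict.nodup_keys_empty
  · exact pvApply_nodup _ _ PySem.Dict.nodup_keys_empty
  · intro k
    rw [pvApply_getD, pvApply_getD]
    congr 1
    exact pvWeight_eq counts n hc k vals (pvVals_pairwise xs)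

lemma pvTail_inner (m nInt : Int) (acc : List Int) :
    (PySem.List.pyRange 0 nInt).foldl (fun acc _ => acc ++ [m]) acc
      = acc ++ PySem.List.pyRepeat [m] nInt := by
  rw [PySem.List.pyRepeat_singleton,
    PySem.List.foldl_append_singleton_eq_map (fun _ => m) (PySem.List.pyRange 0 nInt) acc]
  congr 1
  rw [List.map_const', PySem.List.pyRange_one]
  simp

-- ===== VERDICT (by name: the statement is the Claim_ definition above) =====
theorem spectral_convolution_spec : Claim_equal_spectral_convolution := by
  intro xs _
  show spectral_convolution xs = spectral_convolution_alt xs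
  dsimp only [spectral_convolution, spectral_convolution_alt]
  rw [pvA_loop (PySem.List.sorted xs (fun x => x) true) PySem.Dict.empty]
  dsimp only
  rw [pvConv_eq xs]
  set conv := pvPairs (xs.foldl (fun d mass => d.insert mass (d.getD mass 0 + 1)) (PySem.Dict.empty : PySem.Dict Int Int))
    (PySem.List.sorted (PySem.Set.ofList xs) (fun x => x) true) PySem.Dict.empty
  congr 1
  exact PySem.List.foldl_congr_mem _ _ _ _
    (fun acc mass _ => pvTail_inner mass (conv.getD mass 0) acc)
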